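-- pv_equiv track=rewrite | github.com/AhmedMasoud135/Compiler-Design-Phases | Parsing/visualizer.py | assign_states_to_levels
-- ===== SOURCE A (Python) =====
-- def assign_states_to_levels(num_states, goto_table):
--     """Assign states to hierarchical levels using BFS."""
--     if num_states == 0:
--         return []
--
--     adjacency = {i: [] for i in range(num_states)}
--     for (from_state, symbol), to_state in goto_table.items():
--         if to_state not in adjacency[from_state]:
--             adjacency[from_state].append(to_state)
--
--     visited = {0}
--     levels = [[0]]
--     current_level = [0]
--
--     while current_level:
--         next_level = []
--         for state in current_level:
--             for neighbor in adjacency.get(state, []):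
--                 if neighbor not in visited:
--                     visited.add(neighbor)
--                     next_level.append(neighbor)
--
--         if next_level:
--             levels.append(next_level)
--             current_level = next_level
--         else:
--             break
--
--     unvisited = [i for i in range(num_states) if i not in visited]
--     if unvisited:
--         levels.append(unvisited)
--
--     return levels
-- ===== SOURCE B (Python) =====
-- from collections import deque
--
-- def assign_states_to_levels(num_states, goto_table):
--     """Assign states to hierarchical levels via a single-queue BFS:
--     record a distance for each discovered state, then group the
--     discovery order by distance."""
--     if num_states == 0:
--         return []
--
--     adjacency = {i: [] for i in range(num_states)}
--     for (from_state, symbol), to_state in goto_table.items():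
--         if to_state not in adjacency[from_state]:
--             adjacency[from_state].append(to_state)
--
--     dist = {0: 0}
--     order = [0]
--     queue = deque([0])
--     while queue:
--         state = queue.popleft()
--         for neighbor in adjacency.get(state, []):
--             if neighbor not in dist:
--                 dist[neighbor] = dist[state] + 1
--                 order.append(neighbor)
--                 queue.append(neighbor)
--
--     levels = []
--     for state in order:
--         d = dist[state]
--         if d == len(levels):
--             levels.append([state])
--         else:
--             levels[d].append(state)
--
--     unvisited = [i for i in range(num_states) if i not in dist]
--     if unvisited:
--         levels.append(unvisited)
--     return levels
-- ===== Notes on version B (the rewrite author's own statement) =====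
-- stated objective: alternative
-- what changed: A's level-by-level BFS (rebuild a next_level list each round, append it to levels) is replaced by a single-queue BFS that records a distance for every discovered state and tracks discovery order, followed by a separate pass grouping the discovery order by distance into levels; the unvisited-states tail is unchanged.
import Mathlib
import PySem

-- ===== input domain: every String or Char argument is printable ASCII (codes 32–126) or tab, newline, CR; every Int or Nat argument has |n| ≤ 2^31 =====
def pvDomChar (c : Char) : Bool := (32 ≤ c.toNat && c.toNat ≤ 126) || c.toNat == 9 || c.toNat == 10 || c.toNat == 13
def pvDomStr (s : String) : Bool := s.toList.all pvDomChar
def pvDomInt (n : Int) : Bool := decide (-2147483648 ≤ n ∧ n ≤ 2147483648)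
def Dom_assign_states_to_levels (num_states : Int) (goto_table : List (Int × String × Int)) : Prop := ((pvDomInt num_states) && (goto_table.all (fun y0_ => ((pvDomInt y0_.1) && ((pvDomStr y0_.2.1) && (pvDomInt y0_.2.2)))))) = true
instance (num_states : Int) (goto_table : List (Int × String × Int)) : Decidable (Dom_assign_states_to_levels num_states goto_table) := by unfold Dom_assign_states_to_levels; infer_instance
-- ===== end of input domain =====

-- B replaces A's level-by-level BFS (rebuilding a next_level list each round) by a
-- single-queue BFS that records a distance per state, then groups the discovery
-- order by distance; objective: alternative decomposition of the same BFS.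

-- ===== PORT A =====
-- goto_table arrives as a Python dict: rebuild it as a PySem.Dict so that
-- duplicate-key overwrite and .items() iteration order are Python's.
def pvGotoDictA (goto_table : List (Int × String × Int)) : PySem.Dict (Int × String) Int :=
  goto_table.foldl (fun d p => d.insert (p.1, p.2.1) p.2.2) PySem.Dict.empty

-- adjacency = {i: [] for i in range(num_states)}; then the dedup-append loop
def pvAdjA (num_states : Int) (goto_table : List (Int × String × Int)) :
    PySem.Dict Int (List Int) :=
  (pvGotoDictA goto_table).items.foldl
    (fun d p => if p.2 ∈ d.getD p.1.1 [] then d else d.modify p.1.1 [] (· ++ [p.2]))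
    ((PySem.List.pyRange 0 num_states 1).foldl (fun d i => d.insert i []) PySem.Dict.empty)

-- inner "for neighbor in adjacency.get(state, [])" body of A
def pvVisitA (st : PySem.Set Int × List Int) (ns : List Int) : PySem.Set Int × List Int :=
  ns.foldl (fun st n => if st.1.contains n then st else (st.1.add n, st.2 ++ [n])) st

-- one round: "for state in current_level: …" building (visited, next_level)
def pvExpandA (adj : PySem.Dict Int (List Int)) (st : PySem.Set Int × List Int)
    (cur : List Int) : PySem.Set Int × List Int :=
  cur.foldl (fun st u => pvVisitA st (adj.getD u [])) st

-- the while loop (fuel-bounded; goto_table.length + 1 rounds always suffice)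
def pvLoopA (adj : PySem.Dict Int (List Int)) :
    Nat → PySem.Set Int → List (List Int) → List Int → PySem.Set Int × List (List Int)
  | 0, v, levels, _ => (v, levels)
  | f + 1, v, levels, cur =>
    if cur = [] then (v, levels)
    else
      let st := pvExpandA adj (v, []) cur
      if st.2 = [] then (st.1, levels)
      else pvLoopA adj f st.1 (levels ++ [st.2]) st.2

def assign_states_to_levels (num_states : Int) (goto_table : List (Int × String × Int)) :
    List (List Int) :=
  if num_states = 0 then []
  else
    let adj := pvAdjA num_states goto_table
    let r := pvLoopA adj (goto_table.length + 1) (PySem.Set.ofList [0]) [[0]] [0]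
    let unvisited := (PySem.List.pyRange 0 num_states 1).filter (fun i => !(r.1.contains i))
    if unvisited = [] then r.2 else r.2 ++ [unvisited]

-- ===== PORT B =====
def pvGotoDictB (goto_table : List (Int × String × Int)) : PySem.Dict (Int × String) Int :=
  goto_table.foldl (fun d p => d.insert (p.1, p.2.1) p.2.2) PySem.Dict.empty

def pvAdjB (num_states : Int) (goto_table : List (Int × String × Int)) :
    PySem.Dict Int (List Int) :=
  (pvGotoDictB goto_table).items.foldl
    (fun d p => if p.2 ∈ d.getD p.1.1 [] then d else d.modify p.1.1 [] (· ++ [p.2]))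
    ((PySem.List.pyRange 0 num_states 1).foldl (fun d i => d.insert i []) PySem.Dict.empty)

-- body of "for neighbor in adjacency.get(state, [])": state = (dist, order, queue)
def pvVisitB (u : Int) (st : PySem.Dict Int Int × List Int × List Int) (ns : List Int) :
    PySem.Dict Int Int × List Int × List Int :=
  ns.foldl
    (fun st n =>
      if st.1.contains n then st
      else (st.1.insert n (st.1.getD u 0 + 1), st.2.1 ++ [n], st.2.2 ++ [n]))
    st

-- the single-queue while loop (fuel-bounded; goto_table.length + 2 pops suffice)
def pvLoopB (adj : PySem.Dict Int (List Int)) :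
    Nat → List Int → PySem.Dict Int Int → List Int → PySem.Dict Int Int × List Int
  | _, [], dist, order => (dist, order)
  | 0, _ :: _, dist, order => (dist, order)
  | f + 1, u :: rest, dist, order =>
    let st := pvVisitB u (dist, order, rest) (adj.getD u [])
    pvLoopB adj f st.2.2 st.1 st.2.1

-- grouping pass: levels[d].append(state) / levels.append([state])
def pvRegroup (dist : PySem.Dict Int Int) : List Int → List (List Int) → List (List Int)
  | [], levels => levels
  | u :: rest, levels =>
    let d := dist.getD u 0
    if d = PySem.List.len levels then pvRegroup dist rest (levels ++ [[u]])
    else pvRegroup dist rest (PySem.List.pySetD levels d (PySem.List.pyGetD levels d [] ++ [u]))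

def assign_states_to_levels_alt (num_states : Int) (goto_table : List (Int × String × Int)) :
    List (List Int) :=
  if num_states = 0 then []
  else
    let adj := pvAdjB num_states goto_table
    let r := pvLoopB adj (goto_table.length + 2) [0] (PySem.Dict.empty.insert 0 0) [0]
    let levels := pvRegroup r.1 r.2 []
    let unvisited := (PySem.List.pyRange 0 num_states 1).filter (fun i => !(r.1.contains i))
    if unvisited = [] then levels else levels ++ [unvisited]

-- ===== PRECONDITION & SPEC =====
-- Pre_ excludes exactly the inputs where A raises KeyError: some from_state outside
-- range(num_states) while num_states ≠ 0 (B raises the same KeyError there).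
def Pre_assign_states_to_levels (num_states : Int) (goto_table : List (Int × String × Int)) : Prop :=
  num_states = 0 ∨ ∀ p ∈ goto_table, 0 ≤ p.1 ∧ p.1 < num_states
instance (num_states : Int) (goto_table : List (Int × String × Int)) : Decidable (Pre_assign_states_to_levels num_states goto_table) := by unfold Pre_assign_states_to_levels; infer_instance

def pvWitness_assign_states_to_levels : Int × (List (Int × String × Int)) :=
  (3, [(0, "a", 1), (1, "b", 2), (0, "b", 2)])

def Spec_assign_states_to_levels (num_states : Int) (goto_table : List (Int × String × Int)) (out : List (List Int)) : Prop := out = assign_states_to_levels_alt num_states goto_table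
instance (num_states : Int) (goto_table : List (Int × String × Int)) (out : List (List Int)) : Decidable (Spec_assign_states_to_levels num_states goto_table out) := by unfold Spec_assign_states_to_levels; infer_instance

-- ===== CLAIM (what is proved, stated in full; the proofs are below) =====
def Claim_equal_assign_states_to_levels : Prop := ∀ (num_states : Int) (goto_table : List (Int × String × Int)), Dom_assign_states_to_levels num_states goto_table → Pre_assign_states_to_levels num_states goto_table → Spec_assign_states_to_levels num_states goto_table (assign_states_to_levels num_states goto_table)

-- ===== LEMMAS AND PROOFS =====

-- the two ports build the adjacency dict by the same code
theorem pvAdjB_eq (num_states : Int) (goto_table : List (Int × String × Int)) :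
    pvAdjB num_states goto_table = pvAdjA num_states goto_table := rfl

theorem pvLoopB_nil (adj : PySem.Dict Int (List Int)) (f : Nat)
    (dist : PySem.Dict Int Int) (order : List Int) :
    pvLoopB adj f [] dist order = (dist, order) := by cases f <;> rfl

-- the initial adjacency dict maps every key to []
theorem pvInit_getD (l : List Int) :
    ∀ (d0 : PySem.Dict Int (List Int)), (∀ u : Int, d0.getD u [] = []) →
    ∀ u : Int, (l.foldl (fun d i => d.insert i ([] : List Int)) d0).getD u [] = [] := by
  induction l with
  | nil => intro d0 h; exact h
  | cons i l ih =>
    intro d0 h u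
    refine ih (d0.insert i []) (fun u => ?_) u
    rw [PySem.Dict.getD_insert]
    split
    · rfl
    · exact h u

-- every adjacency value is a target of some goto item
theorem pvAdjFold_sub (ts : List Int) :
    ∀ (l : List ((Int × String) × Int)) (d0 : PySem.Dict Int (List Int)),
    (∀ (u n : Int), n ∈ d0.getD u [] → n ∈ ts) → (∀ p ∈ l, p.2 ∈ ts) →
    ∀ (u n : Int),
      n ∈ ((l.foldl (fun d p => if p.2 ∈ d.getD p.1.1 [] then d else d.modify p.1.1 [] (· ++ [p.2])) d0)).getD u [] →
      n ∈ ts := by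
  intro l
  induction l with
  | nil => intro d0 h0 _; exact h0
  | cons p l ih =>
    intro d0 h0 hl
    simp only [List.foldl_cons]
    refine ih _ ?_ (fun q hq => hl q (by simp [hq]))
    intro u n hn
    by_cases hc : p.2 ∈ d0.getD p.1.1 []
    · rw [if_pos hc] at hn; exact h0 u n hn
    · rw [if_neg hc, PySem.Dict.getD_modify] at hn
      by_cases hu : u = p.1.1
      · rw [if_pos hu] at hn
        rcases List.mem_append.mp hn with h | h
        · exact h0 _ n h
        · simp only [List.mem_singleton] at h; subst h; exact hl p (by simp)
      · rw [if_neg hu] at hn; exact h0 u n hn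

theorem pvAdjA_sub (num_states : Int) (goto_table : List (Int × String × Int)) :
    ∀ (u n : Int), n ∈ (pvAdjA num_states goto_table).getD u [] →
      n ∈ (pvGotoDictA goto_table).items.map (fun p => p.2) := by
  unfold pvAdjA
  refine pvAdjFold_sub _ _ _ ?_ ?_
  · intro u n hn
    rw [pvInit_getD _ _ (fun u => by simp [PySem.Dict.getD_empty]) u] at hn
    cases hn
  · intro p hp; exact List.mem_map.mpr ⟨p, hp, rfl⟩

-- the goto dict has at most as many items as the table
theorem pvFoldSize :
    ∀ (l : List (Int × String × Int)) (d0 : PySem.Dict (Int × String) Int),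
    (l.foldl (fun d p => d.insert (p.1, p.2.1) p.2.2) d0).size ≤ d0.size + l.length := by
  intro l
  induction l with
  | nil => simp
  | cons p l ih =>
    intro d0
    simp only [List.foldl_cons, List.length_cons]
    calc (l.foldl (fun d p => d.insert (p.1, p.2.1) p.2.2) (d0.insert (p.1, p.2.1) p.2.2)).size
        ≤ (d0.insert (p.1, p.2.1) p.2.2).size + l.length := ih _
      _ ≤ d0.size + (l.length + 1) := by rw [PySem.Dict.size_insert]; split <;> omega

theorem pvOfListLen (xs : List Int) : (PySem.Set.ofList xs).length ≤ xs.length := by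
  have h : ∀ (l : List Int) (s : PySem.Set Int),
      (l.foldl PySem.Set.add s).length ≤ s.length + l.length := by
    intro l
    induction l with
    | nil => simp
    | cons x l ih =>
      intro s
      simp only [List.foldl_cons, List.length_cons]
      calc (l.foldl PySem.Set.add (s.add x)).length ≤ (s.add x).length + l.length := ih _
        _ ≤ s.length + (l.length + 1) := by
            have : (s.add x).length ≤ s.length + 1 := by
              simp only [PySem.Set.add]; split <;> simp
            omega
  simpa [PySem.Set.ofList_eq_foldl] using h xs []

-- removing the freshly discovered states shrinks the undiscovered pool by |δ|
theorem pvDiffDrop (S v δ : List Int) (hS : S.Nodup) (hδ : δ.Nodup)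
    (h : ∀ x ∈ δ, x ∈ S ∧ x ∉ v) :
    (PySem.Set.diff S (v ++ δ)).length + δ.length ≤ (PySem.Set.diff S v).length := by
  have hnd : (PySem.Set.diff S (v ++ δ) ++ δ).Nodup := by
    rw [List.nodup_append]
    refine ⟨PySem.Set.nodup_diff _ _ hS, hδ, ?_⟩
    intro a ha b hb
    rintro rfl
    exact ((PySem.Set.mem_diff S (v ++ δ) a).mp ha).2 (List.mem_append.mpr (Or.inr hb))
  have hsub : (PySem.Set.diff S (v ++ δ) ++ δ) ⊆ PySem.Set.diff S v := by
    intro a ha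
    rcases List.mem_append.mp ha with h1 | h1
    · have h2 := (PySem.Set.mem_diff _ _ _).mp h1
      exact (PySem.Set.mem_diff _ _ _).mpr ⟨h2.1, fun hv => h2.2 (List.mem_append.mpr (Or.inl hv))⟩
    · exact (PySem.Set.mem_diff _ _ _).mpr ⟨(h a h1).1, (h a h1).2⟩
  simpa using (hnd.subperm hsub).length_le

-- simulation of one "for neighbor in adjacency.get(state, [])" loop
theorem pvSimN (ts : List Int) (u : Int) (d : Int) :
    ∀ (ns : List Int), (∀ n ∈ ns, n ∈ ts) →
    ∀ (v : PySem.Set Int) (nx : List Int) (dist : PySem.Dict Int Int) (order q : List Int),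
    dist.get? u = some d →
    (∀ x : Int, x ∈ dist.keys ↔ x ∈ v) →
    ∃ (δ : List Int) (dist' : PySem.Dict Int Int),
      pvVisitA (v, nx) ns = (v ++ δ, nx ++ δ) ∧
      pvVisitB u (dist, order, q) ns = (dist', order ++ δ, q ++ δ) ∧
      (∀ x : Int, x ∈ dist'.keys ↔ x ∈ v ∨ x ∈ δ) ∧
      (∀ x ∈ δ, dist'.get? x = some (d + 1)) ∧
      (∀ x : Int, x ∉ δ → dist'.get? x = dist.get? x) ∧
      δ.Nodup ∧ (∀ x ∈ δ, x ∉ v ∧ x ∈ ts) := by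
  intro ns
  induction ns with
  | nil =>
    intro _ v nx dist order q hu hkv
    exact ⟨[], dist, by simp [pvVisitA], by simp [pvVisitB], by simp [hkv],
      by simp, fun _ _ => rfl, by simp, by simp⟩
  | cons n ns ih =>
    intro hns v nx dist order q hu hkv
    by_cases hn : n ∈ v
    · have hA : pvVisitA (v, nx) (n :: ns) = pvVisitA (v, nx) ns := by
        simp only [pvVisitA, List.foldl_cons]
        rw [if_pos ((PySem.Set.contains_iff v n).mpr hn)]
      have hB : pvVisitB u (dist, order, q) (n :: ns) = pvVisitB u (dist, order, q) ns := by
        simp only [pvVisitB, List.foldl_cons]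
        rw [if_pos ((PySem.Dict.contains_iff_mem_keys dist n).mpr ((hkv n).mpr hn))]
      obtain ⟨δ, dist', h1, h2, h3, h4, h5, h6, h7⟩ :=
        ih (fun m hm => hns m (by simp [hm])) v nx dist order q hu hkv
      exact ⟨δ, dist', hA.trans h1, hB.trans h2, h3, h4, h5, h6, h7⟩
    · have hnk : n ∉ dist.keys := fun h => hn ((hkv n).mp h)
      have hA : pvVisitA (v, nx) (n :: ns) = pvVisitA (v ++ [n], nx ++ [n]) ns := by
        simp only [pvVisitA, List.foldl_cons]
        rw [if_neg (fun h => hn ((PySem.Set.contains_iff v n).mp h)),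
          PySem.Set.add_of_not_mem hn]
      have hgd : dist.getD u 0 = d := by rw [PySem.Dict.getD_eq_get?_getD, hu]; rfl
      have hB : pvVisitB u (dist, order, q) (n :: ns)
          = pvVisitB u (dist.insert n (d + 1), order ++ [n], q ++ [n]) ns := by
        simp only [pvVisitB, List.foldl_cons]
        rw [if_neg (fun h => hnk ((PySem.Dict.contains_iff_mem_keys dist n).mp h)), hgd]
      have hun : u ≠ n := by
        rintro rfl
        exact hnk (PySem.Dict.mem_keys_of_mem_items _ (PySem.Dict.mem_items_of_get?_eq_some _ hu))
      have hu1 : (dist.insert n (d + 1)).get? u = some d := by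
        rw [PySem.Dict.get?_insert_of_ne _ _ hun]; exact hu
      have hkv1 : ∀ x : Int, x ∈ (dist.insert n (d + 1)).keys ↔ x ∈ v ++ [n] := by
        intro x
        rw [PySem.Dict.mem_keys_insert]
        simp only [List.mem_append, List.mem_singleton, hkv x]
        tauto
      obtain ⟨δ, dist', h1, h2, h3, h4, h5, h6, h7⟩ :=
        ih (fun m hm => hns m (by simp [hm])) (v ++ [n]) (nx ++ [n])
          (dist.insert n (d + 1)) (order ++ [n]) (q ++ [n]) hu1 hkv1
      refine ⟨n :: δ, dist', ?_, ?_, ?_, ?_, ?_, ?_, ?_⟩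
      · rw [hA, h1]; simp
      · rw [hB, h2]; simp
      · intro x
        rw [h3 x]
        simp only [List.mem_append, List.mem_cons]
        tauto
      · intro x hx
        rcases List.mem_cons.mp hx with rfl | hx
        · have hnδ : x ∉ δ := fun hh => (h7 x hh).1 (by simp)
          rw [h5 x hnδ, PySem.Dict.get?_insert_self]
        · exact h4 x hx
      · intro x hx
        rw [h5 x (fun hh => hx (by simp [hh])),
          PySem.Dict.get?_insert_of_ne _ _ (fun h => hx (by simp [h]))]
      · exact List.nodup_cons.mpr ⟨fun hh => (h7 n hh).1 (by simp), h6⟩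
      · intro x hx
        rcases List.mem_cons.mp hx with rfl | hx
        · exact ⟨hn, hns x (by simp)⟩
        · exact ⟨fun hv => (h7 x hx).1 (by simp [hv]), (h7 x hx).2⟩

-- one whole BFS round: A's "for state in current_level" loop against B popping
-- that block off the front of the queue
theorem pvSimBlock (adj : PySem.Dict Int (List Int)) (ts : List Int)
    (hadj : ∀ (u n : Int), n ∈ adj.getD u [] → n ∈ ts) (d : Int) :
    ∀ (cur : List Int) (f : Nat) (v : PySem.Set Int) (nx : List Int)
      (dist : PySem.Dict Int Int) (order stash : List Int),
    cur.length ≤ f →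
    (∀ u ∈ cur, dist.get? u = some d) →
    (∀ x : Int, x ∈ dist.keys ↔ x ∈ v) →
    (∀ u ∈ cur, u ∈ v) →
    ∃ (δ : List Int) (dist' : PySem.Dict Int Int),
      pvExpandA adj (v, nx) cur = (v ++ δ, nx ++ δ) ∧
      pvLoopB adj f (cur ++ stash) dist order
        = pvLoopB adj (f - cur.length) (stash ++ δ) dist' (order ++ δ) ∧
      (∀ x : Int, x ∈ dist'.keys ↔ x ∈ v ∨ x ∈ δ) ∧
      (∀ x ∈ δ, dist'.get? x = some (d + 1)) ∧
      (∀ x : Int, x ∉ δ → dist'.get? x = dist.get? x) ∧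
      δ.Nodup ∧ (∀ x ∈ δ, x ∉ v ∧ x ∈ ts) := by
  intro cur
  induction cur with
  | nil =>
    intro f v nx dist order stash _ _ hkv _
    exact ⟨[], dist, by simp [pvExpandA], by simp, by simp [hkv],
      by simp, fun _ _ => rfl, by simp, by simp⟩
  | cons u cur ih =>
    intro f v nx dist order stash hf hcd hkv hcv
    obtain ⟨f', rfl⟩ : ∃ f', f = f' + 1 := ⟨f - 1, by simp at hf; omega⟩
    obtain ⟨δ1, dist1, hA1, hB1, hk1, hg1, hp1, hn1, hq1⟩ :=
      pvSimN ts u d (adj.getD u []) (hadj u) v nx dist order (cur ++ stash)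
        (hcd u (by simp)) hkv
    have hstep : pvLoopB adj (f' + 1) ((u :: cur) ++ stash) dist order
        = pvLoopB adj f' ((cur ++ stash) ++ δ1) dist1 (order ++ δ1) := by
      show pvLoopB adj (f' + 1) (u :: (cur ++ stash)) dist order = _
      simp only [pvLoopB, hB1]
    have hrest : ∀ u' ∈ cur, dist1.get? u' = some d := by
      intro u' hu'
      rw [hp1 u' (fun hh => (hq1 u' hh).1 (hcv u' (by simp [hu'])))]
      exact hcd u' (by simp [hu'])
    have hkv1' : ∀ x : Int, x ∈ dist1.keys ↔ x ∈ v ++ δ1 := by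
      intro x; rw [hk1 x]; simp
    obtain ⟨δ2, dist2, hA2, hB2, hk2, hg2, hp2, hn2, hq2⟩ :=
      ih f' (v ++ δ1) (nx ++ δ1) dist1 (order ++ δ1) (stash ++ δ1)
        (by simp at hf ⊢; omega) hrest hkv1'
        (fun u' hu' => by simp [hcv u' (by simp [hu'])])
    refine ⟨δ1 ++ δ2, dist2, ?_, ?_, ?_, ?_, ?_, ?_, ?_⟩
    · have h : pvExpandA adj (v, nx) (u :: cur)
          = pvExpandA adj (pvVisitA (v, nx) (adj.getD u [])) cur := by
        simp only [pvExpandA, List.foldl_cons]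
      rw [h, hA1, hA2]; simp
    · rw [hstep, show (cur ++ stash) ++ δ1 = cur ++ (stash ++ δ1) by simp, hB2]
      rw [show f' - cur.length = (f' + 1) - (u :: cur).length by simp,
        show (stash ++ δ1) ++ δ2 = stash ++ (δ1 ++ δ2) by simp,
        show (order ++ δ1) ++ δ2 = order ++ (δ1 ++ δ2) by simp]
    · intro x
      rw [hk2 x]
      simp only [List.mem_append]
      tauto
    · intro x hx
      rcases List.mem_append.mp hx with hx | hx
      · rw [hp2 x (fun hh => (hq2 x hh).1 (by simp [hx]))]
        exact hg1 x hx
      · exact hg2 x hx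
    · intro x hx
      rw [hp2 x (fun hh => hx (by simp [hh])), hp1 x (fun hh => hx (by simp [hh]))]
    · rw [List.nodup_append]
      refine ⟨hn1, hn2, ?_⟩
      intro a ha b hb
      rintro rfl
      exact (hq2 a hb).1 (by simp [ha])
    · intro x hx
      rcases List.mem_append.mp hx with hx | hx
      · exact hq1 x hx
      · exact ⟨fun hv => (hq2 x hx).1 (by simp [hv]), (hq2 x hx).2⟩

-- the full while loops: A's level loop against B's queue loop
theorem pvSimLoop (adj : PySem.Dict Int (List Int)) (ts : List Int)
    (hadj : ∀ (u n : Int), n ∈ adj.getD u [] → n ∈ ts) :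
    ∀ (fa fb : Nat) (v : PySem.Set Int) (dist : PySem.Dict Int Int)
      (levs0 : List (List Int)) (cur : List Int),
    cur ≠ [] →
    (∀ (i : Nat) (l : List Int), (levs0 ++ [cur])[i]? = some l →
        ∀ u ∈ l, dist.get? u = some (i : Int)) →
    (∀ x : Int, x ∈ dist.keys ↔ x ∈ v) →
    (∀ u ∈ (levs0 ++ [cur]).flatten, u ∈ v) →
    (∀ l ∈ levs0 ++ [cur], l ≠ []) →
    ((PySem.Set.ofList ts).diff v).length < fa →
    cur.length + ((PySem.Set.ofList ts).diff v).length ≤ fb →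
    ∃ distF : PySem.Dict Int Int,
      pvLoopB adj fb cur dist ((levs0 ++ [cur]).flatten)
        = (distF, (pvLoopA adj fa v (levs0 ++ [cur]) cur).2.flatten) ∧
      (∀ x : Int, x ∈ distF.keys ↔ x ∈ (pvLoopA adj fa v (levs0 ++ [cur]) cur).1) ∧
      (∀ (i : Nat) (l : List Int), (pvLoopA adj fa v (levs0 ++ [cur]) cur).2[i]? = some l →
          ∀ u ∈ l, distF.get? u = some (i : Int)) ∧
      (∀ l ∈ (pvLoopA adj fa v (levs0 ++ [cur]) cur).2, l ≠ []) := by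
  intro fa
  induction fa with
  | zero => intro fb v dist levs0 cur _ _ _ _ _ hfa _; omega
  | succ fa ih =>
    intro fb v dist levs0 cur hcur hlev hkv hflat hne hfa hfb
    have hcd : ∀ u ∈ cur, dist.get? u = some ((levs0.length : Nat) : Int) :=
      fun u hu => hlev levs0.length cur (by rw [List.getElem?_concat_length]) u hu
    obtain ⟨δ, dist', hA, hB, hk, hg, hp, hn, hq⟩ :=
      pvSimBlock adj ts hadj ((levs0.length : Nat) : Int) cur fb v [] dist
        ((levs0 ++ [cur]).flatten) [] (by omega) hcd hkv
        (fun u hu => hflat u (List.mem_flatten.mpr ⟨cur, by simp, hu⟩))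
    simp only [List.append_nil, List.nil_append] at hB
    have hAstep : pvLoopA adj (fa + 1) v (levs0 ++ [cur]) cur
        = if δ = [] then (v ++ δ, levs0 ++ [cur])
          else pvLoopA adj fa (v ++ δ) ((levs0 ++ [cur]) ++ [δ]) δ := by
      have hst : pvExpandA adj (v, []) cur = (v ++ δ, δ) := by rw [hA]; simp
      simp only [pvLoopA, if_neg hcur, hst]
    by_cases hδ : δ = []
    · subst hδ
      replace hAstep : pvLoopA adj (fa + 1) v (levs0 ++ [cur]) cur = (v, levs0 ++ [cur]) := by
        rw [hAstep]; simp
      replace hB : pvLoopB adj fb cur dist ((levs0 ++ [cur]).flatten)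
          = (dist', (levs0 ++ [cur]).flatten) := by
        simp only [List.append_nil] at hB
        rw [hB, pvLoopB_nil]
      refine ⟨dist', ?_, ?_, ?_, ?_⟩
      · rw [hB, hAstep]
      · intro x
        rw [hAstep]
        simpa using hk x
      · intro i l hl u hu
        rw [hAstep] at hl
        rw [hp u (by simp)]
        exact hlev i l hl u hu
      · intro l hl
        rw [hAstep] at hl
        exact hne l hl
    · rw [if_neg hδ] at hAstep
      have hδ1 : 0 < δ.length := List.length_pos_of_ne_nil hδ
      have hdrop := pvDiffDrop (PySem.Set.ofList ts) v δ (PySem.Set.nodup_ofList ts) hn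
        (fun x hx => ⟨(PySem.Set.mem_ofList ts x).mpr (hq x hx).2, (hq x hx).1⟩)
      have hlev' : ∀ (i : Nat) (l : List Int), ((levs0 ++ [cur]) ++ [δ])[i]? = some l →
          ∀ u ∈ l, dist'.get? u = some (i : Int) := by
        intro i l hl u hu
        by_cases hi : i < (levs0 ++ [cur]).length
        · rw [List.getElem?_append_left hi] at hl
          have huv : u ∈ v := hflat u (List.mem_flatten.mpr ⟨l, List.mem_of_getElem? hl, hu⟩)
          rw [hp u (fun hh => (hq u hh).1 huv)]
          exact hlev i l hl u hu
        · have hi2 : i = (levs0 ++ [cur]).length := by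
            rcases Nat.lt_or_ge i ((levs0 ++ [cur]) ++ [δ]).length with h | h
            · simp only [List.length_append, List.length_cons, List.length_nil] at h hi ⊢
              omega
            · rw [List.getElem?_eq_none h] at hl; cases hl
          subst hi2
          rw [List.getElem?_concat_length] at hl
          obtain rfl : δ = l := by cases hl; rfl
          rw [hg u hu]
          congr 1
          simp only [List.length_append, List.length_cons, List.length_nil]
          push_cast
          ring
      have hkv' : ∀ x : Int, x ∈ dist'.keys ↔ x ∈ v ++ δ := fun x => by rw [hk x]; simp
      have hflat' : ∀ u ∈ ((levs0 ++ [cur]) ++ [δ]).flatten, u ∈ v ++ δ := by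
        intro u hu
        rw [List.flatten_append] at hu
        rcases List.mem_append.mp hu with h | h
        · exact List.mem_append.mpr (Or.inl (hflat u h))
        · simp only [List.flatten_cons, List.flatten_nil, List.append_nil] at h
          exact List.mem_append.mpr (Or.inr h)
      have hne' : ∀ l ∈ (levs0 ++ [cur]) ++ [δ], l ≠ [] := by
        intro l hl
        rcases List.mem_append.mp hl with h | h
        · exact hne l h
        · simp only [List.mem_singleton] at h; subst h; exact hδ
      obtain ⟨distF, hBF, hkF, hgF, hneF⟩ :=
        ih (fb - cur.length) (v ++ δ) dist' (levs0 ++ [cur]) δ hδ hlev' hkv' hflat' hne'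
          (by omega) (by omega)
      refine ⟨distF, ?_, ?_, ?_, ?_⟩
      · rw [hB, hAstep,
          show (levs0 ++ [cur]).flatten ++ δ = ((levs0 ++ [cur]) ++ [δ]).flatten by
            rw [List.flatten_append]; simp]
        exact hBF
      · rw [hAstep]; exact hkF
      · rw [hAstep]; exact hgF
      · rw [hAstep]; exact hneF

-- grouping: a run of states with distance = len(acc0) extends the last level
theorem pvRegroupRun (dist : PySem.Dict Int Int) (acc0 : List (List Int)) :
    ∀ (l : List Int) (tail : List Int) (p : List Int),
    (∀ u ∈ l, dist.getD u 0 = (acc0.length : Int)) →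
    pvRegroup dist (l ++ tail) (acc0 ++ [p]) = pvRegroup dist tail (acc0 ++ [p ++ l]) := by
  intro l
  induction l with
  | nil => intro tail p _; simp
  | cons x l ih =>
    intro tail p h
    have hx : dist.getD x 0 = (acc0.length : Int) := h x (by simp)
    have hcond : ¬(dist.getD x 0 = PySem.List.len (acc0 ++ [p])) := by
      rw [PySem.List.len_eq, hx]
      simp only [List.length_append, List.length_cons, List.length_nil]
      push_cast
      omega
    have hget : PySem.List.pyGetD (acc0 ++ [p]) (dist.getD x 0) [] = p := by
      rw [hx]
      simp [List.getD]
    have hset : PySem.List.pySetD (acc0 ++ [p]) (dist.getD x 0) (p ++ [x]) = acc0 ++ [p ++ [x]] := by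
      rw [hx]
      simp [PySem.List.pySetD, PySem.List.pySet?, PySem.List.pyIdx?]
    show pvRegroup dist (x :: (l ++ tail)) (acc0 ++ [p]) = _
    simp only [pvRegroup]
    rw [if_neg hcond, hget, hset, ih tail (p ++ [x]) (fun u hu => h u (by simp [hu]))]
    simp

-- grouping the concatenated levels in discovery order rebuilds the levels
theorem pvRegroupLevels (dist : PySem.Dict Int Int) :
    ∀ (L : List (List Int)) (acc : List (List Int)),
    (∀ (i : Nat) (l : List Int), L[i]? = some l →
        ∀ u ∈ l, dist.getD u 0 = ((acc.length + i : Nat) : Int)) →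
    (∀ l ∈ L, l ≠ []) →
    pvRegroup dist L.flatten acc = acc ++ L := by
  intro L
  induction L with
  | nil => intro acc _ _; simp [pvRegroup]
  | cons l L ih =>
    intro acc h hne
    obtain ⟨x, lr, rfl⟩ : ∃ x lr, l = x :: lr := by
      cases l with
      | nil => exact absurd rfl (hne [] (by simp))
      | cons a b => exact ⟨a, b, rfl⟩
    have hx : dist.getD x 0 = (acc.length : Int) := by
      have := h 0 (x :: lr) (by simp) x (by simp)
      simpa using this
    have hcond : dist.getD x 0 = PySem.List.len acc := by rw [PySem.List.len_eq, hx]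
    simp only [List.flatten_cons]
    rw [show (x :: lr) ++ L.flatten = x :: (lr ++ L.flatten) by simp]
    simp only [pvRegroup]
    rw [if_pos hcond]
    rw [pvRegroupRun dist acc lr L.flatten [x]
      (fun u hu => by simpa using h 0 (x :: lr) (by simp) u (by simp [hu]))]
    rw [ih (acc ++ [[x] ++ lr])
      (fun i l2 hl2 u hu => by
        have h2 := h (i + 1) l2 (by simpa using hl2) u hu
        have h3 : ((acc ++ [[x] ++ lr]).length + i : Nat) = (acc.length + (i + 1) : Nat) := by
          simp
          omega
        rw [h3]
        exact h2)
      (fun l2 hl2 => hne l2 (by simp [hl2]))]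
    simp

theorem pv_main (num_states : Int) (goto_table : List (Int × String × Int)) :
    assign_states_to_levels num_states goto_table
      = assign_states_to_levels_alt num_states goto_table := by
  by_cases h0 : num_states = 0
  · simp [assign_states_to_levels, assign_states_to_levels_alt, h0]
  · simp only [assign_states_to_levels, assign_states_to_levels_alt, if_neg h0, pvAdjB_eq]
    set adj := pvAdjA num_states goto_table with hadjdef
    set ts := (pvGotoDictA goto_table).items.map (fun p => p.2) with htsdef
    have hlen : ts.length ≤ goto_table.length := by
      have h1 : ts.length = (pvGotoDictA goto_table).size := by
        rw [htsdef, List.length_map]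
        rfl
      have h2 : (pvGotoDictA goto_table).size ≤ goto_table.length := by
        have := pvFoldSize goto_table PySem.Dict.empty
        simpa [pvGotoDictA] using this
      omega
    have hR : ((PySem.Set.ofList ts).diff (PySem.Set.ofList [0])).length ≤ goto_table.length := by
      calc ((PySem.Set.ofList ts).diff (PySem.Set.ofList [0])).length
          ≤ (PySem.Set.ofList ts).length := List.length_filter_le _ _
        _ ≤ ts.length := pvOfListLen ts
        _ ≤ goto_table.length := hlen
    have hlev0 : ∀ (i : Nat) (l : List Int),
        (([] : List (List Int)) ++ [[0]])[i]? = some l →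
        ∀ u ∈ l, (PySem.Dict.empty.insert (0 : Int) (0 : Int)).get? u = some (i : Int) := by
      intro i l hl u hu
      cases i with
      | zero =>
        simp only [List.nil_append, List.getElem?_cons_zero, Option.some.injEq] at hl
        subst hl
        simp only [List.mem_singleton] at hu
        subst hu
        simp [PySem.Dict.get?_insert_self]
      | succ j => simp at hl
    have hkv0 : ∀ x : Int,
        x ∈ (PySem.Dict.empty.insert (0 : Int) (0 : Int)).keys ↔ x ∈ PySem.Set.ofList [0] := by
      intro x
      rw [PySem.Dict.mem_keys_insert]
      simp [PySem.Dict.keys_empty, PySem.Set.mem_ofList]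
    have hflat0 : ∀ u ∈ (([] : List (List Int)) ++ [[(0 : Int)]]).flatten,
        u ∈ PySem.Set.ofList [(0 : Int)] := by
      intro u hu
      simp only [List.nil_append, List.flatten_cons, List.flatten_nil, List.append_nil] at hu
      simp [PySem.Set.mem_ofList, hu]
    have hne0 : ∀ l ∈ ([] : List (List Int)) ++ [[(0 : Int)]], l ≠ [] := by simp
    obtain ⟨distF, hBF, hkF, hgF, hneF⟩ :=
      pvSimLoop adj ts (pvAdjA_sub num_states goto_table) (goto_table.length + 1)
        (goto_table.length + 2) (PySem.Set.ofList [0]) (PySem.Dict.empty.insert 0 0)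
        [] [0] (by simp) hlev0 hkv0 hflat0 hne0 (by omega)
        (by simp only [List.length_cons, List.length_nil]; omega)
    simp only [List.nil_append] at hBF hkF hgF hneF
    set PA := pvLoopA adj (goto_table.length + 1) (PySem.Set.ofList [0]) [[0]] [0] with hPAdef
    rw [show ([[(0 : Int)]]).flatten = [(0 : Int)] by simp] at hBF
    have h1 : (pvLoopB adj (goto_table.length + 2) [0] (PySem.Dict.empty.insert 0 0) [0]).1
        = distF := by rw [hBF]
    have h2 : (pvLoopB adj (goto_table.length + 2) [0] (PySem.Dict.empty.insert 0 0) [0]).2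
        = PA.2.flatten := by rw [hBF]
    have hreg : pvRegroup distF PA.2.flatten [] = PA.2 := by
      refine (pvRegroupLevels distF PA.2 [] ?_ hneF).trans (by simp)
      intro i l hl u hu
      rw [PySem.Dict.getD_eq_get?_getD, hgF i l hl u hu]
      simp
    have hcont : ∀ i : Int, distF.contains i = PySem.Set.contains PA.1 i := by
      intro i
      by_cases h : i ∈ PA.1
      · rw [(PySem.Set.contains_iff PA.1 i).mpr h,
          (PySem.Dict.contains_iff_mem_keys distF i).mpr ((hkF i).mpr h)]
      · have ha : distF.contains i = false := by
          cases hcb : distF.contains i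
          · rfl
          · exact absurd ((hkF i).mp ((PySem.Dict.contains_iff_mem_keys distF i).mp hcb)) h
        have hb : PySem.Set.contains PA.1 i = false := by
          cases hcb : PySem.Set.contains PA.1 i
          · rfl
          · exact absurd ((PySem.Set.contains_iff PA.1 i).mp hcb) h
        rw [ha, hb]
    have hfilt : (PySem.List.pyRange 0 num_states 1).filter (fun i => !(distF.contains i))
        = (PySem.List.pyRange 0 num_states 1).filter (fun i => !(PySem.Set.contains PA.1 i)) :=
      List.filter_congr (fun i _ => by rw [hcont i])
    simp only [h1, h2, hreg, hfilt]

-- ===== VERDICT (by name: the statement is the Claim_ definition above) =====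
theorem assign_states_to_levels_spec : Claim_equal_assign_states_to_levels := by
  intro ns gt _ _
  unfold Spec_assign_states_to_levels
  exact pv_main ns gt
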